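-- pv_equiv track=rewrite | github.com/jmhanun/calculator | Smart Calculator/task/calculator/calculator.py | check_order_elements
-- ===== SOURCE A (Python) =====
-- def check_order_elements(data):
--     operators = ['+', '-', '*', '/', '^']
--     insert_0 = []
--
--     # after number nothing or an number or an operator
--     # after ')' nothing or an ')' or operator
--     # after operator a number or '('
--     # after '(' a number or '('
--     for index, element in enumerate(data):
--         # after number nothing or an number or an operator or ')'
--         if element.isdigit():
--             if len(data) != index + 1:
--                 next_element = data[index + 1]
--                 if next_element.isdigit() or next_element in operators or next_element == ')':
--                     continue
--                 else:
--                     raise IndexError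
--             else:
--                 continue
--
--         # after ')' nothing or an ')' or operator
--         if element == ')':
--             if len(data) != index + 1:
--                 next_element = data[index + 1]
--                 if next_element in operators or next_element == ')':
--                     continue
--                 else:
--                     raise IndexError
--             else:
--                 continue
--
--         # after operator a number or '('
--         if element in operators:
--             if len(data) != index + 1:
--                 next_element = data[index + 1]
--                 if next_element.isdigit() or next_element == '(':
--                     continue
--                 else:
--                     raise IndexError
--             else:
--                 raise IndexError
--
--         # after '(' a number or '('
--         if element == '(':
--             if len(data) != index + 1:
--                 next_element = data[index + 1]
--                 if next_element.isdigit() or next_element == '(':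
--                     continue
--                 elif next_element == "-":
--                     insert_0.append(index)
--                 else:
--                     raise IndexError
--             else:
--                 raise IndexError
--     while insert_0:
--         index = insert_0.pop()
--         data = data[:index + 1] + "0" + data[index + 1:]
--
--     return data
-- ===== SOURCE B (Python) =====
-- def check_order_elements(data):
--     operators = ('+', '-', '*', '/', '^')
--     out = []
--     n = len(data)
--     for i, ch in enumerate(data):
--         out.append(ch)
--         nxt = data[i + 1] if i + 1 < n else None
--         if ch.isdigit():
--             if nxt is not None and not (nxt.isdigit() or nxt in operators or nxt == ')'):
--                 raise IndexError
--         elif ch == ')':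
--             if nxt is not None and not (nxt in operators or nxt == ')'):
--                 raise IndexError
--         elif ch in operators:
--             if nxt is None or not (nxt.isdigit() or nxt == '('):
--                 raise IndexError
--         elif ch == '(':
--             if nxt is None:
--                 raise IndexError
--             if nxt == '-':
--                 out.append('0')
--             elif not (nxt.isdigit() or nxt == '('):
--                 raise IndexError
--     return ''.join(out)
-- ===== Notes on version B (the rewrite author's own statement) =====
-- stated objective: simpler
-- what changed: B replaces A's two phases (collect insertion indices, then repeatedly rebuild the string by slicing back-to-front) with a single forward pass that validates each successor and emits the output list directly, appending '0' right after a '(' followed by '-', joined once at the end.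
import Mathlib
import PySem

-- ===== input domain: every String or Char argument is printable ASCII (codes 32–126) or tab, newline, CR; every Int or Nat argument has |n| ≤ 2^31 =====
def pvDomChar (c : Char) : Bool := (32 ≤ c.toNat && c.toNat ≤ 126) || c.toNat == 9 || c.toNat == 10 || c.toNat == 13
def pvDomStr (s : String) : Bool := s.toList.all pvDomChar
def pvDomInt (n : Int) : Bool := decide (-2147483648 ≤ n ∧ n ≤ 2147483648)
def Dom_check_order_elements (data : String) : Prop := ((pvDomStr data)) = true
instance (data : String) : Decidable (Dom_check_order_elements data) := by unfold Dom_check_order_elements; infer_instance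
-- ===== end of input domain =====

-- B collapses A's two phases (index collection + back-to-front slice insertion) into one forward
-- pass that emits the output directly; equivalence is proved on Pre_ (inputs where A does not raise).


-- ===== PORT A =====
-- operators = ['+', '-', '*', '/', '^']
def pvOps : List Char := ['+', '-', '*', '/', '^']
def pvIsOp (c : Char) : Bool := pvOps.contains c

-- the for-loop: iterates the string carrying the current index; `rest.head?` is
-- `data[index+1]` when `len(data) != index + 1` (none exactly when index+1 = len).
-- Returns the collected `insert_0` list (ascending), none where Python raises IndexError.
def pvALoop (i : Nat) : List Char → Option (List Nat)
  | [] => some []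
  | c :: rest =>
    if PySem.Chars.isdigit c then
      match rest.head? with
      | some n => if PySem.Chars.isdigit n || pvIsOp n || n = ')' then pvALoop (i+1) rest else none
      | none => pvALoop (i+1) rest
    else if c = ')' then
      match rest.head? with
      | some n => if pvIsOp n || n = ')' then pvALoop (i+1) rest else none
      | none => pvALoop (i+1) rest
    else if pvIsOp c then
      match rest.head? with
      | some n => if PySem.Chars.isdigit n || n = '(' then pvALoop (i+1) rest else none
      | none => none
    else if c = '(' then
      match rest.head? with
      | some n =>
        if PySem.Chars.isdigit n || n = '(' then pvALoop (i+1) rest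
        else if n = '-' then (pvALoop (i+1) rest).map (i :: ·)
        else none
      | none => none
    else pvALoop (i+1) rest

-- while insert_0: pop the LAST index (list is ascending, so iterate the reverse) and
-- data = data[:index+1] + "0" + data[index+1:]; the slices are exact take/drop for a Nat index.
def pvAIns (ds : List Char) : List Nat → List Char
  | [] => ds
  | i :: rest => pvAIns (ds.take (i+1) ++ '0' :: ds.drop (i+1)) rest

def check_order_elements (data : String) : String :=
  match pvALoop 0 data.toList with
  | none => ""   -- Python raises IndexError here; excluded by Pre_
  | some idxs => String.ofList (pvAIns data.toList idxs.reverse)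

-- ===== PORT B =====
-- single forward pass: emit each char, validate its successor, emit '0' after '(' followed by '-'.
def pvBLoop : List Char → Option (List Char)
  | [] => some []
  | c :: rest =>
    if PySem.Chars.isdigit c then
      match rest.head? with
      | some n => if PySem.Chars.isdigit n || pvIsOp n || n = ')' then (pvBLoop rest).map (c :: ·) else none
      | none => (pvBLoop rest).map (c :: ·)
    else if c = ')' then
      match rest.head? with
      | some n => if pvIsOp n || n = ')' then (pvBLoop rest).map (c :: ·) else none
      | none => (pvBLoop rest).map (c :: ·)
    else if pvIsOp c then
      match rest.head? with
      | some n => if PySem.Chars.isdigit n || n = '(' then (pvBLoop rest).map (c :: ·) else none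
      | none => none
    else if c = '(' then
      match rest.head? with
      | some n =>
        if n = '-' then (pvBLoop rest).map (fun t => c :: '0' :: t)
        else if PySem.Chars.isdigit n || n = '(' then (pvBLoop rest).map (c :: ·)
        else none
      | none => none
    else (pvBLoop rest).map (c :: ·)

def check_order_elements_alt (data : String) : String :=
  match pvBLoop data.toList with
  | none => ""   -- Python raises IndexError here; excluded by Pre_
  | some out => String.ofList out

-- ===== PRECONDITION & SPEC =====
-- Pre_ excludes exactly the inputs on which A raises IndexError: some adjacent pair of
-- characters violates the successor rules, or the string ends in an operator or '('.
def pvStepOk (c n : Char) : Bool :=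
  if PySem.Chars.isdigit c then PySem.Chars.isdigit n || pvIsOp n || n = ')'
  else if c = ')' then pvIsOp n || n = ')'
  else if pvIsOp c then PySem.Chars.isdigit n || n = '('
  else if c = '(' then PySem.Chars.isdigit n || n = '(' || n = '-'
  else true

def pvLastOk (c : Char) : Bool := !(pvIsOp c || c = '(')

def Pre_check_order_elements (data : String) : Prop :=
  List.IsChain (fun a b => pvStepOk a b = true) data.toList ∧
  data.toList.getLast?.all pvLastOk = true

instance (data : String) : Decidable (Pre_check_order_elements data) := by
  unfold Pre_check_order_elements; infer_instance

def pvWitness_check_order_elements : String := "(-3)+2"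

def Spec_check_order_elements (data : String) (out : String) : Prop := out = check_order_elements_alt data
instance (data : String) (out : String) : Decidable (Spec_check_order_elements data out) := by unfold Spec_check_order_elements; infer_instance

-- ===== CLAIM (what is proved, stated in full; the proofs are below) =====
def Claim_equal_check_order_elements : Prop := ∀ (data : String), Dom_check_order_elements data → Pre_check_order_elements data → Spec_check_order_elements data (check_order_elements data)

-- ===== LEMMAS AND PROOFS =====

-- B's output described as "cs with '0' inserted after each position in idxs" (counter k).
def pvWeave : List Char → List Nat → Nat → List Char
  | [], _, _ => []
  | c :: rest, idxs, k =>
    if idxs.head? = some k then c :: '0' :: pvWeave rest idxs.tail (k+1)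
    else c :: pvWeave rest idxs (k+1)

lemma pvWeave_nil (cs : List Char) (k : Nat) : pvWeave cs [] k = cs := by
  induction cs generalizing k with
  | nil => rfl
  | cons c rest ih => simp [pvWeave, ih]

-- Main loop lemma: on Pre_-good suffixes, A's loop returns indices idxs (ascending, in range)
-- and B's loop returns the weave of the suffix with those indices.
lemma pvMain (cs : List Char) : ∀ i : Nat,
    List.IsChain (fun a b => pvStepOk a b = true) cs →
    cs.getLast?.all pvLastOk = true →
    ∃ idxs, pvALoop i cs = some idxs ∧ pvBLoop cs = some (pvWeave cs idxs i) ∧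
      idxs.Pairwise (· < ·) ∧ ∀ j ∈ idxs, i ≤ j ∧ j < i + cs.length := by
  induction cs with
  | nil =>
    intro i _ _
    exact ⟨[], rfl, rfl, by simp, by simp⟩
  | cons c rest ih =>
    intro i hchain hlast
    cases rest with
    | nil =>
      simp only [List.getLast?_singleton, Option.all_some] at hlast
      by_cases hd : PySem.Chars.isdigit c
      · exact ⟨[], by simp [pvALoop, hd], by simp [pvBLoop, hd, pvWeave], by simp, by simp⟩
      · by_cases hr : c = ')'
        · exact ⟨[], by simp [pvALoop, hr], by simp [pvBLoop, hr, pvWeave], by simp, by simp⟩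
        · by_cases hop : pvIsOp c
          · simp [pvLastOk, hop] at hlast
          · by_cases hpar : c = '('
            · simp [pvLastOk, hpar, pvIsOp, pvOps] at hlast
            · exact ⟨[], by simp [pvALoop, hd, hr, hop, hpar],
                by simp [pvBLoop, hd, hr, hop, hpar, pvWeave], by simp, by simp⟩
    | cons n rest' =>
      rw [List.isChain_cons_cons] at hchain
      obtain ⟨hstep, hchain'⟩ := hchain
      rw [List.getLast?_cons_cons] at hlast
      obtain ⟨idxs, hA, hB, hpw, hbd⟩ := ih (i+1) hchain' hlast
      have hhead : idxs.head? ≠ some i := by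
        cases idxs with
        | nil => simp
        | cons j js =>
          simp only [List.head?_cons, ne_eq, Option.some.injEq]
          have := (hbd j (by simp)).1
          omega
      have hh : (n :: rest').head? = some n := rfl
      have e1 : PySem.Chars.isdigit ')' = false := by decide
      have e2 : PySem.Chars.isdigit '(' = false := by decide
      have e5 : PySem.Chars.isdigit '-' = false := by decide
      have f1 : ¬ (('(' : Char) = ')') := by decide
      have f2 : pvIsOp '(' = false := by decide
      have f3 : ¬ (('-' : Char) = '(') := by decide
      unfold pvStepOk at hstep
      generalize hrs : (n :: rest') = rs at hA hB hbd hh ⊢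
      by_cases hd : PySem.Chars.isdigit c
      · rw [if_pos hd] at hstep
        refine ⟨idxs, ?_, ?_, hpw, ?_⟩
        · simp [pvALoop, hd, hh, hstep, hA]
        · simp [pvBLoop, hd, hh, hstep, hB, pvWeave, hhead]
        · intro j hj; have := hbd j hj
          simp only [List.length_cons] at this ⊢; omega
      · rw [if_neg hd] at hstep
        by_cases hr : c = ')'
        · rw [if_pos hr] at hstep
          refine ⟨idxs, ?_, ?_, hpw, ?_⟩
          · simp [pvALoop, hr, e1, hh, hstep, hA]
          · simp [pvBLoop, hr, e1, hh, hstep, hB, pvWeave, hhead]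
          · intro j hj; have := hbd j hj
            simp only [List.length_cons] at this ⊢; omega
        · rw [if_neg hr] at hstep
          by_cases hop : pvIsOp c
          · rw [if_pos hop] at hstep
            refine ⟨idxs, ?_, ?_, hpw, ?_⟩
            · simp [pvALoop, hd, hr, hop, hh, hstep, hA]
            · simp [pvBLoop, hd, hr, hop, hh, hstep, hB, pvWeave, hhead]
            · intro j hj; have := hbd j hj
              simp only [List.length_cons] at this ⊢; omega
          · rw [if_neg hop] at hstep
            by_cases hpar : c = '('
            · rw [if_pos hpar] at hstep
              by_cases hm : n = '-'
              · refine ⟨i :: idxs, ?_, ?_, ?_, ?_⟩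
                · simp [pvALoop, hpar, e2, f1, f2, hm, e5, f3, hh, hA]
                · simp [pvBLoop, hpar, e2, f1, f2, hm, hh, hB, pvWeave]
                · refine List.pairwise_cons.2 ⟨?_, hpw⟩
                  intro j hj; have := (hbd j hj).1; omega
                · intro j hj
                  rcases List.mem_cons.1 hj with h | h
                  · subst h
                    simp only [List.length_cons]; omega
                  · have := hbd j h
                    simp only [List.length_cons] at this ⊢; omega
              · have hg : (PySem.Chars.isdigit n || n = '(') = true := by
                  simp only [Bool.or_eq_true, decide_eq_true_eq] at hstep ⊢
                  rcases hstep with h | h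
                  · exact h
                  · exact absurd h hm
                refine ⟨idxs, ?_, ?_, hpw, ?_⟩
                · simp [pvALoop, hpar, e2, f1, f2, hg, hh, hA]
                · simp [pvBLoop, hpar, e2, f1, f2, hm, hg, hh, hB, pvWeave, hhead]
                · intro j hj; have := hbd j hj
                  simp only [List.length_cons] at this ⊢; omega
            · refine ⟨idxs, ?_, ?_, hpw, ?_⟩
              · simp [pvALoop, hd, hr, hop, hpar, hA]
              · simp [pvBLoop, hd, hr, hop, hpar, hB, pvWeave, hhead]
              · intro j hj; have := hbd j hj
                simp only [List.length_cons] at this ⊢; omega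

-- Inserting '0' at absolute position i (take/drop) into a weave whose pending indices are all > i
-- equals weaving with i put in front.
lemma pvIns_weave (cs : List Char) : ∀ (i k : Nat) (rest : List Nat), k ≤ i → i + 1 - k ≤ cs.length →
    (∀ j ∈ rest, i < j) →
    (pvWeave cs rest k).take (i+1-k) ++ '0' :: (pvWeave cs rest k).drop (i+1-k) =
      pvWeave cs (i :: rest) k := by
  induction cs with
  | nil => intro i k rest hk hlen _; simp at hlen; omega
  | cons c cs' ih =>
    intro i k rest hk hlen hgt
    have hhead : rest.head? ≠ some k := by
      intro hcontra
      cases rest with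
      | nil => simp at hcontra
      | cons j js => simp at hcontra; have := hgt j (by simp); omega
    rw [show pvWeave (c :: cs') rest k = c :: pvWeave cs' rest (k+1) by
      simp [pvWeave, hhead]]
    by_cases hik : i = k
    · subst hik
      simp [pvWeave]
    · have hik' : k + 1 ≤ i := by omega
      have h1 : i + 1 - k = (i - k) + 1 := by omega
      rw [h1]
      simp only [List.take_succ_cons, List.drop_succ_cons, List.cons_append]
      rw [show i - k = i + 1 - (k+1) by omega]
      rw [ih i (k+1) rest hik' (by simp at hlen ⊢; omega) hgt]
      simp [pvWeave, show ¬ (i = k) from hik]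

lemma pvAIns_foldl (l : List Nat) : ∀ ds : List Char,
    pvAIns ds l = List.foldl (fun ds i => ds.take (i+1) ++ '0' :: ds.drop (i+1)) ds l := by
  induction l with
  | nil => intro ds; rfl
  | cons i rest ih => intro ds; simp [pvAIns, ih]

lemma pvAIns_eq_weave (idxs : List Nat) : ∀ cs : List Char, idxs.Pairwise (· < ·) →
    (∀ j ∈ idxs, j < cs.length) → pvAIns cs idxs.reverse = pvWeave cs idxs 0 := by
  induction idxs with
  | nil => intro cs _ _; simp [pvAIns_foldl, pvWeave_nil]
  | cons i rest ih =>
    intro cs hpw hbd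
    rw [List.pairwise_cons] at hpw
    rw [pvAIns_foldl, List.foldl_reverse, List.foldr_cons, ← List.foldl_reverse, ← pvAIns_foldl]
    rw [ih cs hpw.2 (fun j hj => hbd j (by simp [hj]))]
    have := pvIns_weave cs i 0 rest (Nat.zero_le i) (by have := hbd i (by simp); omega) hpw.1
    simpa using this

-- ===== VERDICT (by name: the statement is the Claim_ definition above) =====
theorem check_order_elements_spec : Claim_equal_check_order_elements := by
  intro data _hdom hpre
  obtain ⟨hchain, hlast⟩ := hpre
  obtain ⟨idxs, hA, hB, hpw, hbd⟩ := pvMain data.toList 0 hchain hlast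
  unfold Spec_check_order_elements check_order_elements check_order_elements_alt
  simp only [hA, hB]
  rw [pvAIns_eq_weave idxs data.toList hpw (fun j hj => by have := (hbd j hj).2; omega)]
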